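-- pv_equiv track=rewrite | github.com/lyclyq/MOE-temp | scripts/plot_paper_metrics.py | _safe_key
-- ===== SOURCE A (Python) =====
-- from typing import Any, Callable, Dict, List, Sequence
--
-- def _safe_key(name: str) -> str:
--     out: List[str] = []
--     prev_us = False
--     for ch in str(name).strip().lower():
--         keep = ch.isalnum()
--         if keep:
--             out.append(ch)
--             prev_us = False
--             continue
--         if not prev_us:
--             out.append("_")
--             prev_us = True
--     return "".join(out).strip("_") or "task"
-- ===== SOURCE B (Python) =====
-- def _safe_key(name: str) -> str:
--     s = str(name).strip().lower()
--     runs = []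
--     i, n = 0, len(s)
--     while i < n:
--         if s[i].isalnum():
--             j = i + 1
--             while j < n and s[j].isalnum():
--                 j += 1
--             runs.append(s[i:j])
--             i = j
--         else:
--             i += 1
--     return "_".join(runs) or "task"
-- ===== Notes on version B (the rewrite author's own statement) =====
-- stated objective: alternative
-- what changed: Replaces A's stateful prev_us single pass, which emits placeholder underscores and then strips them at both ends, with a scan that extracts the maximal alphanumeric runs and joins them with underscores, so no underscore bookkeeping or final strip is needed.
import Mathlib
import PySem

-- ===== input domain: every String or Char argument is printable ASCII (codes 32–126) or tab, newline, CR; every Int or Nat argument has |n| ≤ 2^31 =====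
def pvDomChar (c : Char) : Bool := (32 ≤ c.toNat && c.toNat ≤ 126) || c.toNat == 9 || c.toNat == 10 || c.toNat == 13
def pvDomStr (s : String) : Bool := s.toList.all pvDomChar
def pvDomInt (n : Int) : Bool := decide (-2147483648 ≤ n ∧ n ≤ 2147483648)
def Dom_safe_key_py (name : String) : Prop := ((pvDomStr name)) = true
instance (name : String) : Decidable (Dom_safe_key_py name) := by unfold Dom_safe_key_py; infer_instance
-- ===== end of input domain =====

-- B replaces A's stateful prev_us pass (placeholder underscores plus a final two-sided strip)
-- by extracting the maximal alphanumeric runs and joining them with underscores (objective: alternative).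

-- ===== PORT A =====
-- A's loop body: append the kept char, or a single '_' per non-alnum run (prev_us flag)
def pvStepA (acc : List Char × Bool) (ch : Char) : List Char × Bool :=
  if PySem.Chars.isalnum ch then (acc.1 ++ [ch], false)
  else if !acc.2 then (acc.1 ++ ['_'], true)
  else acc

def safe_key_py (name : String) : String :=
  let st := (PySem.Str.lower (PySem.Str.strip name)).toList.foldl pvStepA ([], false)
  let r := PySem.Chars.stripChars st.1 ['_']
  if r = [] then "task" else String.ofList r

-- ===== PORT B =====
-- Source B's outer while loop; its inner run-collecting while loop is the takeWhile/dropWhile pair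
def pvAlnumRuns (s : List Char) : List (List Char) :=
  match s with
  | [] => []
  | c :: t =>
    if PySem.Chars.isalnum c then
      (c :: t.takeWhile PySem.Chars.isalnum) :: pvAlnumRuns (t.dropWhile PySem.Chars.isalnum)
    else pvAlnumRuns t
termination_by s.length
decreasing_by
  · simpa using Nat.lt_succ_of_le (List.length_dropWhile_le _ _)
  · simp

def safe_key_py_alt (name : String) : String :=
  let r := PySem.Chars.join ['_']
      (pvAlnumRuns (PySem.Str.lower (PySem.Str.strip name)).toList)
  if r = [] then "task" else String.ofList r

-- ===== PRECONDITION & SPEC =====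
def Spec_safe_key_py (name : String) (out : String) : Prop := out = safe_key_py_alt name
instance (name : String) (out : String) : Decidable (Spec_safe_key_py name out) := by unfold Spec_safe_key_py; infer_instance

-- ===== CLAIM (what is proved, stated in full; the proofs are below) =====
def Claim_equal_safe_key_py : Prop := ∀ (name : String), Dom_safe_key_py name → Spec_safe_key_py name (safe_key_py name)

-- ===== LEMMAS AND PROOFS =====

-- the membership test strip("_") uses
def pvP (c : Char) : Bool := (['_'] : List Char).contains c

-- A's loop as a recursion over the remaining characters given the prev_us flag
def pvL : List Char → Bool → List Char
  | [], _ => []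
  | c :: t, p =>
    if PySem.Chars.isalnum c then c :: pvL t false
    else if p then pvL t true
    else '_' :: pvL t true

-- rstrip("_") on a character list
def pvR (x : List Char) : List Char := (x.reverse.dropWhile pvP).reverse

theorem pvP_of_alnum {c : Char} (h : PySem.Chars.isalnum c = true) : pvP c = false := by
  simp only [pvP, List.contains_cons, List.contains_nil, Bool.or_false]
  rw [beq_eq_false_iff_ne]
  rintro rfl
  exact absurd h (by decide)

theorem pvFoldl_eq (cs : List Char) (acc : List Char) (b : Bool) :
    (cs.foldl pvStepA (acc, b)).1 = acc ++ pvL cs b := by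
  induction cs generalizing acc b with
  | nil => simp [pvL]
  | cons c t ih =>
    rw [List.foldl_cons]
    by_cases h : PySem.Chars.isalnum c = true
    · rw [show pvStepA (acc, b) c = (acc ++ [c], false) from by simp [pvStepA, h], ih]
      simp [pvL, h]
    · cases b with
      | false =>
        rw [show pvStepA (acc, false) c = (acc ++ ['_'], true) from by simp [pvStepA, h], ih]
        simp [pvL, h]
      | true =>
        rw [show pvStepA (acc, true) c = (acc, true) from by simp [pvStepA, h], ih]
        simp [pvL, h]

theorem pvL_true (t : List Char) :
    pvL t true = pvL (t.dropWhile (fun c => !PySem.Chars.isalnum c)) false := by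
  induction t with
  | nil => rfl
  | cons c t ih =>
    by_cases h : PySem.Chars.isalnum c = true
    · simp [pvL, h]
    · rw [show pvL (c :: t) true = pvL t true from by simp [pvL, h], ih]
      simp [h]

theorem pvL_run (w r : List Char) (h : ∀ c ∈ w, PySem.Chars.isalnum c = true) :
    pvL (w ++ r) false = w ++ pvL r false := by
  induction w with
  | nil => rfl
  | cons c t ih =>
    have hc := h c (by simp)
    simp only [List.cons_append, pvL, hc, if_true]
    rw [ih (fun x hx => h x (by simp [hx]))]

theorem pvRuns_dropWhile (u : List Char) :
    pvAlnumRuns (u.dropWhile (fun c => !PySem.Chars.isalnum c)) = pvAlnumRuns u := by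
  induction u with
  | nil => rfl
  | cons c t ih =>
    by_cases h : PySem.Chars.isalnum c = true
    · simp [h]
    · have h2 : pvAlnumRuns (c :: t) = pvAlnumRuns t := by
        rw [pvAlnumRuns]; simp [h]
      rw [List.dropWhile_cons]
      simp only [h, Bool.not_false, if_pos]
      rw [ih, h2]

theorem pvDropWhile_head {q : Char → Bool} {u : List Char} {d : Char} {t : List Char}
    (h : u.dropWhile q = d :: t) : q d = false := by
  induction u with
  | nil => simp at h
  | cons c s ih =>
    rw [List.dropWhile_cons] at h
    by_cases hc : q c = true
    · rw [if_pos hc] at h; exact ih h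
    · rw [if_neg hc] at h
      injection h with h1 _
      subst h1
      simpa using hc

theorem pvDropWhile_of_all {q : Char → Bool} {l : List Char}
    (h : ∀ c ∈ l, q c = false) : l.dropWhile q = l := by
  cases l with
  | nil => rfl
  | cons c t => simp [h c (by simp)]

theorem pvR_append (w y : List Char) (hw : ∀ c ∈ w, pvP c = false) :
    pvR (w ++ y) = w ++ pvR y := by
  unfold pvR
  rw [List.reverse_append, List.dropWhile_append]
  have hself : w.reverse.dropWhile pvP = w.reverse :=
    pvDropWhile_of_all (fun c hc => hw c (by simpa using hc))
  by_cases h : y.reverse.dropWhile pvP = []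
  · simp [h, hself]
  · simp [List.isEmpty_iff, h]

theorem pvR_underscore (x : List Char) (hx : pvR x ≠ []) :
    pvR ('_' :: x) = '_' :: pvR x := by
  have hne : x.reverse.dropWhile pvP ≠ [] := by
    intro h; apply hx; simp [pvR, h]
  unfold pvR
  rw [List.reverse_cons, List.dropWhile_append]
  simp [List.isEmpty_iff, hne]

theorem pvStrip_eq (s : List Char) :
    PySem.Chars.stripChars s ['_'] = pvR (s.dropWhile pvP) := rfl

theorem pvJoin_cons (a : List Char) (l : List (List Char)) :
    PySem.Chars.join ['_'] (a :: l)
      = a ++ (if l = [] then [] else '_' :: PySem.Chars.join ['_'] l) := by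
  cases l with
  | nil => simp [PySem.Chars.join_singleton]
  | cons b t => simp [PySem.Chars.join_cons_cons]

theorem pvMain (u : List Char) :
    PySem.Chars.stripChars (pvL u false) ['_'] = PySem.Chars.join ['_'] (pvAlnumRuns u) := by
  match u with
  | [] => simp [pvL, pvAlnumRuns, PySem.Chars.stripChars, PySem.Chars.join_nil]
  | c :: t =>
    by_cases hc : PySem.Chars.isalnum c = true
    · -- alphanumeric head: both sides emit the maximal run w verbatim
      have hw : ∀ x ∈ c :: t.takeWhile PySem.Chars.isalnum, PySem.Chars.isalnum x = true := by
        intro x hx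
        rcases List.mem_cons.mp hx with h | h
        · subst h; exact hc
        · exact List.mem_takeWhile_imp h
      have hwP : ∀ x ∈ c :: t.takeWhile PySem.Chars.isalnum, pvP x = false :=
        fun x hx => pvP_of_alnum (hw x hx)
      have hL : pvL (c :: t) false =
          (c :: t.takeWhile PySem.Chars.isalnum) ++ pvL (t.dropWhile PySem.Chars.isalnum) false := by
        conv_lhs => rw [show c :: t =
          (c :: t.takeWhile PySem.Chars.isalnum) ++ t.dropWhile PySem.Chars.isalnum by
            simp [List.takeWhile_append_dropWhile]]
        exact pvL_run _ _ hw
      have hruns : pvAlnumRuns (c :: t) =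
          (c :: t.takeWhile PySem.Chars.isalnum) :: pvAlnumRuns (t.dropWhile PySem.Chars.isalnum) := by
        rw [pvAlnumRuns]; simp [hc]
      rw [hL, hruns, pvStrip_eq, pvJoin_cons]
      rw [show ((c :: List.takeWhile PySem.Chars.isalnum t) ++
            pvL (List.dropWhile PySem.Chars.isalnum t) false).dropWhile pvP
          = (c :: List.takeWhile PySem.Chars.isalnum t) ++
            pvL (List.dropWhile PySem.Chars.isalnum t) false by
        rw [List.cons_append, List.dropWhile_cons, if_neg (by simp [hwP c (by simp)])]]
      rw [pvR_append _ _ hwP]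
      congr 1
      cases hr : t.dropWhile PySem.Chars.isalnum with
      | nil => simp [pvL, pvAlnumRuns, pvR, List.dropWhile_nil]
      | cons c' t' =>
        have hc' : PySem.Chars.isalnum c' = false := pvDropWhile_head hr
        have hLr : pvL (c' :: t') false =
            '_' :: pvL (t'.dropWhile (fun x => !PySem.Chars.isalnum x)) false := by
          rw [show pvL (c' :: t') false = '_' :: pvL t' true from by simp [pvL, hc'], pvL_true]
        have hrr : pvAlnumRuns (c' :: t') =
            pvAlnumRuns (t'.dropWhile (fun x => !PySem.Chars.isalnum x)) := by
          rw [pvRuns_dropWhile t']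
          rw [pvAlnumRuns]; simp [hc']
        rw [hLr, hrr]
        cases hu2 : t'.dropWhile (fun x => !PySem.Chars.isalnum x) with
        | nil =>
          simp [pvL, pvAlnumRuns, pvR, pvP]
        | cons d t'' =>
          have hd : PySem.Chars.isalnum d = true := by
            have := pvDropWhile_head hu2; simpa using this
          have IH := pvMain (d :: t'')
          have hLd : pvL (d :: t'') false = d :: pvL t'' false := by
            simp [pvL, hd]
          have hIH : pvR (pvL (d :: t'') false) = PySem.Chars.join ['_'] (pvAlnumRuns (d :: t'')) := by
            rw [← IH, pvStrip_eq, hLd, List.dropWhile_cons,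
              if_neg (by simp [pvP_of_alnum hd])]
          have hruns_d : pvAlnumRuns (d :: t'') =
              (d :: t''.takeWhile PySem.Chars.isalnum) :: pvAlnumRuns (t''.dropWhile PySem.Chars.isalnum) := by
            rw [pvAlnumRuns]; simp [hd]
          have hjne : PySem.Chars.join ['_'] (pvAlnumRuns (d :: t'')) ≠ [] := by
            rw [hruns_d, pvJoin_cons]; simp
          have hne : pvR (pvL (d :: t'') false) ≠ [] := by
            rw [hIH]; exact hjne
          rw [pvR_underscore _ hne, hIH, if_neg (by rw [hruns_d]; simp)]
    · -- non-alphanumeric head: the '_' A emits is removed by the leading strip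
      have hL : pvL (c :: t) false =
          '_' :: pvL (t.dropWhile (fun x => !PySem.Chars.isalnum x)) false := by
        rw [show pvL (c :: t) false = '_' :: pvL t true from by simp [pvL, hc], pvL_true]
      have hruns : pvAlnumRuns (c :: t) =
          pvAlnumRuns (t.dropWhile (fun x => !PySem.Chars.isalnum x)) := by
        rw [pvRuns_dropWhile t]
        rw [pvAlnumRuns]; simp [hc]
      have IH := pvMain (t.dropWhile (fun x => !PySem.Chars.isalnum x))
      rw [hL, hruns, pvStrip_eq, List.dropWhile_cons, if_pos (by simp [pvP]), ← pvStrip_eq, IH]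
termination_by u.length
decreasing_by
  · have h1 : t''.length + 1 ≤ t'.length := by
      have := List.length_dropWhile_le (fun x => !PySem.Chars.isalnum x) t'
      rw [hu2] at this; simpa using this
    have h2 : t'.length + 1 ≤ t.length := by
      have := List.length_dropWhile_le PySem.Chars.isalnum t
      rw [hr] at this; simpa using this
    simp; omega
  · have := List.length_dropWhile_le (fun x => !PySem.Chars.isalnum x) t
    simpa using Nat.lt_succ_of_le this

-- ===== VERDICT (by name: the statement is the Claim_ definition above) =====
theorem safe_key_py_spec : Claim_equal_safe_key_py := by
  intro name _
  simp only [Spec_safe_key_py, safe_key_py, safe_key_py_alt]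
  rw [pvFoldl_eq _ [] false, List.nil_append, pvMain]
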